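-- pv_equiv track=rewrite | github.com/specificlanguage/AdventOfCode | 2024/Day25/day25.py | lockHeight
-- ===== SOURCE A (Python) =====
-- def lockHeight(grid):
--     heights = []
--     for c in range(len(grid[0])):
--         for r in range(len(grid)):
--             if grid[r][c] == '.':
--                 heights.append(r - 1)
--                 break
--     return heights
-- ===== SOURCE B (Python) =====
-- def lockHeight(grid):
--     result = [None for _ in grid[0]]
--     for r, row in enumerate(grid):
--         result = [h if h is not None else (r - 1 if ch == '.' else None)
--                   for h, ch in zip(result, row)]
--     return [h for h in result if h is not None]
-- ===== Notes on version B (the rewrite author's own statement) =====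
-- stated objective: alternative
-- what changed: Replaces A's column-major scan with inner break by a single row-major pass that maintains a per-column table of first-dot heights (filled lazily, filtered at the end).
-- outside the precondition, e.g. on lockHeight(['#.', '.']): A returns [0, -1], B returns [0]; on lockHeight(['..', '.']): A returns [-1, -1], B returns [-1]
import Mathlib
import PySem

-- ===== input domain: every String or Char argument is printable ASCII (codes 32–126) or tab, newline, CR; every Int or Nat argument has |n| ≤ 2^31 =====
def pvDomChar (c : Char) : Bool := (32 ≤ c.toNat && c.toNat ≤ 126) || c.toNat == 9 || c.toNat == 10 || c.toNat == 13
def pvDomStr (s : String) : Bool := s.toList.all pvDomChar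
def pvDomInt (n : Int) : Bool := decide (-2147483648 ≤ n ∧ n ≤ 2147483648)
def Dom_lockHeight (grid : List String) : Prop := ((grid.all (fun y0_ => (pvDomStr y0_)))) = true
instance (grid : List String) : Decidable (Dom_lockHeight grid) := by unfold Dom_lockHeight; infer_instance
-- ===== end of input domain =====

-- B replaces A's column-major scan (inner break) by one row-major pass maintaining a
-- per-column table of heights, filtered at the end; equal on non-empty grids whose rows
-- are at least as long as row 0.

-- ===== PORT A =====
-- inner 'for r in range(len(grid)): if grid[r][c]=='.': append(r-1); break' — returns the appended value, none if no break
def lockAFind (grid : List String) (c : Int) : List Int → Option Int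
  | [] => none
  | r :: rs =>
    if PySem.Str.pyGet? ((PySem.List.pyGet? grid r).getD "") c = some '.' then some (r - 1)
    else lockAFind grid c rs

def lockHeight (grid : List String) : List Int :=
  (PySem.List.pyRange 0 (PySem.Str.len ((PySem.List.pyGet? grid 0).getD "")) 1).foldl
    (fun heights c =>
      match lockAFind grid c (PySem.List.pyRange 0 (grid.length : Int) 1) with
      | some h => heights ++ [h]
      | none => heights) []

-- ===== PORT B =====
-- one row of B's pass: [h if h is not None else (r-1 if ch=='.' else None) for h, ch in zip(result, row)]
def lockBStep (r : Int) (result : List (Option Int)) (row : List Char) : List (Option Int) :=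
  (result.zip row).map (fun p =>
    match p.1 with
    | some v => some v
    | none => if p.2 = '.' then some (r - 1) else none)

def lockHeight_alt (grid : List String) : List Int :=
  ((PySem.List.enumerate grid 0).foldl (fun result p => lockBStep p.1 result p.2.toList)
      (((PySem.List.pyGet? grid 0).getD "").toList.map (fun _ => (none : Option Int)))).filterMap id

-- ===== PRECONDITION & SPEC =====
-- Pre_ excludes the empty grid (A raises IndexError on grid[0]) and ragged grids with a row
-- shorter than row 0, on which A's survival depends on where dots sit (grid[r][c] may raise
-- IndexError) while B's zip silently truncates; on some such grids A still returns (see cites).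
def Pre_lockHeight (grid : List String) : Prop :=
  grid ≠ [] ∧ ∀ s ∈ grid, ((grid.headD "").toList.length ≤ s.toList.length)
instance (grid : List String) : Decidable (Pre_lockHeight grid) := by unfold Pre_lockHeight; infer_instance
def pvWitness_lockHeight : List String := (["#.", ".."])
def Spec_lockHeight (grid : List String) (out : List Int) : Prop := out = lockHeight_alt grid
instance (grid : List String) (out : List Int) : Decidable (Spec_lockHeight grid out) := by unfold Spec_lockHeight; infer_instance

-- ===== CLAIM (what is proved, stated in full; the proofs are below) =====
def Claim_equal_lockHeight : Prop := ∀ (grid : List String), Dom_lockHeight grid → Pre_lockHeight grid → Spec_lockHeight grid (lockHeight grid)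

-- ===== LEMMAS AND PROOFS =====

-- first row index ≥ r in `rows` whose character at column c is '.', minus one
def firstDot (c : Int) (r : Int) : List String → Option Int
  | [] => none
  | s :: rest => if PySem.Str.pyGet? s c = some '.' then some (r - 1) else firstDot c (r + 1) rest

theorem lockAFind_eq_firstDot (grid : List String) (c : Int) :
    ∀ (tail : List String) (r : Int), 0 ≤ r → grid.drop r.toNat = tail →
    lockAFind grid c (PySem.List.pyRange r (grid.length : Int) 1) = firstDot c r tail := by
  intro tail
  induction tail with
  | nil =>
    intro r hr hdrop
    have hlen : grid.length ≤ r.toNat := by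
      by_contra h
      have := List.drop_eq_nil_iff.mp hdrop
      omega
    rw [PySem.List.pyRange_one_eq_nil (by omega)]
    rfl
  | cons s rest ih =>
    intro r hr hdrop
    have hlt : r.toNat < grid.length := by
      by_contra h
      rw [List.drop_eq_nil_iff.mpr (by omega)] at hdrop
      exact absurd hdrop (by simp)
    have hget : grid[r.toNat]? = some s := by
      have h0 : (grid.drop r.toNat)[0]? = some s := by rw [hdrop]; rfl
      simpa [List.getElem?_drop] using h0
    have hpg : PySem.List.pyGet? grid r = some s := by
      rw [show r = (r.toNat : Int) from (Int.toNat_of_nonneg hr).symm,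
        PySem.List.pyGet?_natCast, hget]
    rw [PySem.List.pyRange_one_cons (by omega)]
    show (if PySem.Str.pyGet? ((PySem.List.pyGet? grid r).getD "") c = some '.' then some (r - 1)
          else lockAFind grid c (PySem.List.pyRange (r + 1) (grid.length : Int) 1)) = _
    rw [hpg]
    have hrest : grid.drop (r + 1).toNat = rest := by
      rw [show (r + 1).toNat = r.toNat + 1 by omega, ← List.drop_drop, hdrop]
      rfl
    rw [ih (r + 1) (by omega) hrest]
    rfl

-- generic: range-map of getD reproduces the list
theorem map_getD_range {α : Type} (L : List α) (d : α) :
    (List.range L.length).map (fun c => L.getD c d) = L := by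
  induction L with
  | nil => rfl
  | cons x xs ih =>
    rw [List.length_cons, List.range_succ_eq_map, List.map_cons, List.map_map]
    simp only [List.getD_cons_zero]
    have hc : ((fun c => (x :: xs).getD c d) ∘ Nat.succ) = fun c => xs.getD c d := by
      funext c; rfl
    rw [hc, ih]

-- foldl with conditional append is filterMap
theorem foldl_toList_append {α β : Type} (F : α → Option β) :
    ∀ (l : List α) (acc : List β),
    l.foldl (fun hs c => hs ++ (F c).toList) acc = acc ++ l.filterMap F := by
  intro l
  induction l with
  | nil => intro acc; simp
  | cons x xs ih =>
    intro acc
    rw [List.foldl_cons, ih, List.filterMap_cons]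
    cases hF : F x <;> simp

-- B's row fold computes, per column, the stored value or else the first dot in the remaining rows
theorem lockB_fold_eq (tail : List String) :
    ∀ (r : Int) (R : List (Option Int)), (∀ s ∈ tail, R.length ≤ s.toList.length) →
    (PySem.List.enumerate tail r).foldl (fun result p => lockBStep p.1 result p.2.toList) R
      = (List.range R.length).map (fun c => (R.getD c none).or (firstDot (c : Int) r tail)) := by
  induction tail with
  | nil =>
    intro r R _
    rw [PySem.List.enumerate_nil, List.foldl_nil]
    have : (fun c => (R.getD c none).or (firstDot (c : Int) r [])) = fun c => R.getD c none := by
      funext c; simp [firstDot]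
    rw [this, map_getD_range]
  | cons s rest ih =>
    intro r R hlen
    have hs : R.length ≤ s.toList.length := hlen s (by simp)
    rw [PySem.List.enumerate_cons, List.foldl_cons]
    have hlen' : (lockBStep r R s.toList).length = R.length := by
      simp only [lockBStep, List.length_map, List.length_zip]
      omega
    have hrest : ∀ t ∈ rest, (lockBStep r R s.toList).length ≤ t.toList.length := by
      intro t ht; rw [hlen']; exact hlen t (by simp [ht])
    rw [ih (r + 1) _ hrest, hlen']
    apply List.map_congr_left
    intro c hc
    have hcR : c < R.length := List.mem_range.mp hc
    have hstep : (lockBStep r R s.toList).getD c none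
        = (match R[c] with
           | some v => some v
           | none => if s.toList[c]'(by omega) = '.' then some (r - 1) else none) := by
      rw [List.getD_eq_getElem _ _ (by rw [hlen']; exact hcR)]
      simp only [lockBStep, List.getElem_map, List.getElem_zip]
    rw [hstep, List.getD_eq_getElem _ _ hcR]
    have hsc : PySem.Str.pyGet? s (c : Int) = some (s.toList[c]'(by omega)) := by
      rw [PySem.Str.pyGet?_natCast]
      exact List.getElem?_eq_getElem (by omega)
    have hfd : firstDot (c : Int) r (s :: rest)
        = if s.toList[c]'(by omega) = '.' then some (r - 1)
          else firstDot (c : Int) (r + 1) rest := by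
      show (if PySem.Str.pyGet? s (c : Int) = some '.' then some ((r : Int) - 1) else _) = _
      rw [hsc]
      by_cases hd : s.toList[c]'(by omega) = '.' <;> simp [hd]
    rw [hfd]
    cases hR : R[c] with
    | some v => simp
    | none =>
      by_cases hd : s.toList[c]'(by omega) = '.' <;> simp [hd]

-- ===== VERDICT (by name: the statement is the Claim_ definition above) =====
theorem lockHeight_spec : Claim_equal_lockHeight := by
  intro grid _ hpre
  obtain ⟨hne, hlen⟩ := hpre
  obtain ⟨g0, gs, rfl⟩ : ∃ g0 gs, grid = g0 :: gs := by
    cases grid with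
    | nil => exact absurd rfl hne
    | cons a l => exact ⟨a, l, rfl⟩
  show lockHeight (g0 :: gs) = lockHeight_alt (g0 :: gs)
  have hpg0 : PySem.List.pyGet? (g0 :: gs) 0 = some g0 := PySem.List.pyGet?_zero_cons g0 gs
  have hA : lockHeight (g0 :: gs)
      = (List.range g0.toList.length).filterMap (fun k : Nat => firstDot (k : Int) 0 (g0 :: gs)) := by
    unfold lockHeight
    rw [hpg0]
    have hfun : (fun (heights : List Int) (c : Int) =>
          match lockAFind (g0 :: gs) c (PySem.List.pyRange 0 (((g0 :: gs).length : Nat) : Int) 1) with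
          | some h => heights ++ [h]
          | none => heights)
        = fun heights c =>
            heights ++ (lockAFind (g0 :: gs) c (PySem.List.pyRange 0 (((g0 :: gs).length : Nat) : Int) 1)).toList := by
      funext heights c
      cases lockAFind (g0 :: gs) c (PySem.List.pyRange 0 (((g0 :: gs).length : Nat) : Int) 1) <;> simp
    rw [hfun,
      foldl_toList_append
        (fun c => lockAFind (g0 :: gs) c (PySem.List.pyRange 0 (((g0 :: gs).length : Nat) : Int) 1)),
      List.nil_append,
      show PySem.Str.len ((some g0).getD "") = (g0.toList.length : Int) by simp [PySem.Str.len_eq],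
      PySem.List.pyRange_one 0 ((g0.toList.length : Nat) : Int), List.filterMap_map]
    apply List.filterMap_congr
    intro k _
    show lockAFind (g0 :: gs) (0 + (k : Int)) _ = firstDot (k : Int) 0 (g0 :: gs)
    rw [zero_add]
    exact lockAFind_eq_firstDot (g0 :: gs) (k : Int) (g0 :: gs) 0 le_rfl rfl
  have hB : lockHeight_alt (g0 :: gs)
      = (List.range g0.toList.length).filterMap (fun k : Nat => firstDot (k : Int) 0 (g0 :: gs)) := by
    unfold lockHeight_alt
    rw [hpg0,
      show ((some g0).getD "").toList.map (fun _ => (none : Option Int))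
          = List.replicate g0.toList.length none by simp [List.map_const']]
    have hlens : ∀ s ∈ g0 :: gs,
        (List.replicate g0.toList.length (none : Option Int)).length ≤ s.toList.length := by
      intro s hs
      rw [List.length_replicate]
      simpa using hlen s hs
    rw [lockB_fold_eq (g0 :: gs) 0 _ hlens, List.length_replicate, List.filterMap_map]
    simp only [Function.comp_def, id_eq]
    apply List.filterMap_congr
    intro c hc
    have hcn : c < g0.toList.length := List.mem_range.mp hc
    show ((List.replicate g0.toList.length (none : Option Int)).getD c none).or
        (firstDot (c : Int) 0 (g0 :: gs)) = _
    rw [List.getD_eq_getElem _ _ (by simpa using hcn)]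
    simp
  rw [hA, hB]
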